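-- pv_equiv track=rewrite | github.com/posl/comment_recommendation | script/mod_gen/3_time/en/267_B/7.py | isSplit
-- ===== SOURCE A (Python) =====
-- def isSplit(list1):
--     if list1[0] == 0:
--         return False
--     else:
--         columns = []
--         for i in range(1, len(list1)):
--             if list1[i] == 1:
--                 columns.append(i)
--         for i in range(1, len(columns)):
--             if columns[i] - columns[i - 1] > 2:
--                 return True
--         return False
-- ===== SOURCE B (Python) =====
-- def isSplit(list1):
--     if list1[0] == 0:
--         return False
--     prev = None
--     for i in range(1, len(list1)):
--         if list1[i] == 1:
--             if prev is not None and i - prev > 2: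
--                 return True
--             prev = i
--     return False
-- ===== Notes on version B (the rewrite author's own statement) =====
-- stated objective: simpler
-- what changed: Single streaming pass keeping only the last marked index in a scalar, instead of building the full index list and then scanning adjacent pairs in a second loop.
import Mathlib
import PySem

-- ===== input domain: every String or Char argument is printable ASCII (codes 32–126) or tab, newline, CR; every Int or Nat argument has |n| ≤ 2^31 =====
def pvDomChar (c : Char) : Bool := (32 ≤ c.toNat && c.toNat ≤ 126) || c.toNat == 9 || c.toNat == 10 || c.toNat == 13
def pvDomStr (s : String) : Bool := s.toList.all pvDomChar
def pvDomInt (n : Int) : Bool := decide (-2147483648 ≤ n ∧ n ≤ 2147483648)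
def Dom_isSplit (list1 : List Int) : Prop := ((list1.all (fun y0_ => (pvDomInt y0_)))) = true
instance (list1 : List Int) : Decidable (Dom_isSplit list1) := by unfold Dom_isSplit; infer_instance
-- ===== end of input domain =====

-- B keeps one scalar "last marked index" in a single pass instead of A's gather-then-scan; return value only.

-- ===== PORT A =====
-- first loop of A: collect the indices i ≥ 1 with list1[i] == 1, in order
def collectA : List Int → Int → List Int
  | [], _ => []
  | x :: xs, i => if x = 1 then i :: collectA xs (i + 1) else collectA xs (i + 1)

-- second loop of A: scan adjacent pairs of the collected indices for a gap > 2
def scanA : List Int → Bool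
  | a :: b :: rest => if b - a > 2 then true else scanA (b :: rest)
  | _ => false

def isSplit (list1 : List Int) : Bool :=
  match list1 with
  | [] => false   -- unreachable under Pre_isSplit: Python raises IndexError on []
  | x :: xs => if x = 0 then false else scanA (collectA xs 1)

-- ===== PORT B =====
-- B's single loop: prev = last index with value 1 (None initially)
def goB : List Int → Int → Option Int → Bool
  | [], _, _ => false
  | x :: xs, i, prev =>
    if x = 1 then
      match prev with
      | some p => if i - p > 2 then true else goB xs (i + 1) (some i)
      | none => goB xs (i + 1) (some i)
    else goB xs (i + 1) prev

def isSplit_alt (list1 : List Int) : Bool :=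
  match list1 with
  | [] => false   -- unreachable under Pre_isSplit: Python raises IndexError on []
  | x :: xs => if x = 0 then false else goB xs 1 none

-- ===== PRECONDITION & SPEC =====
-- Pre_ excludes only the empty list, where both Pythons raise IndexError reading the first element.
def Pre_isSplit (list1 : List Int) : Prop := list1 ≠ []
instance (list1 : List Int) : Decidable (Pre_isSplit list1) := by unfold Pre_isSplit; infer_instance
def pvWitness_isSplit : List Int := [1, 0, 1, 0, 0, 1]

def Spec_isSplit (list1 : List Int) (out : Bool) : Prop := out = isSplit_alt list1
instance (list1 : List Int) (out : Bool) : Decidable (Spec_isSplit list1 out) := by unfold Spec_isSplit; infer_instance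

-- ===== CLAIM (what is proved, stated in full; the proofs are below) =====
def Claim_equal_isSplit : Prop := ∀ (list1 : List Int), Dom_isSplit list1 → Pre_isSplit list1 → Spec_isSplit list1 (isSplit list1)

-- ===== LEMMAS AND PROOFS =====

-- scanP p cols: scan cols for a gap > 2 where the previous element is p
def scanP : Int → List Int → Bool
  | _, [] => false
  | p, b :: rest => if b - p > 2 then true else scanP b rest

theorem scanA_cons (a : Int) (l : List Int) : scanA (a :: l) = scanP a l := by
  induction l generalizing a with
  | nil => rfl
  | cons b rest ih => simp [scanA, scanP, ih]

theorem goB_eq (xs : List Int) : ∀ (i : Int),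
    goB xs i none = scanA (collectA xs i) ∧
    ∀ p, goB xs i (some p) = scanP p (collectA xs i) := by
  induction xs with
  | nil => intro i; exact ⟨rfl, fun _ => rfl⟩
  | cons x t ih =>
    intro i
    constructor
    · by_cases hx : x = 1
      · simp [goB, collectA, hx, scanA_cons, (ih (i + 1)).2]
      · simp [goB, collectA, hx, (ih (i + 1)).1]
    · intro p
      by_cases hx : x = 1
      · simp [goB, collectA, hx, scanP, (ih (i + 1)).2]
      · simp [goB, collectA, hx, (ih (i + 1)).2]

-- ===== VERDICT (by name: the statement is the Claim_ definition above) =====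
theorem isSplit_spec : Claim_equal_isSplit := by
  intro list1 _ hpre
  unfold Spec_isSplit
  match list1 with
  | [] => exact absurd rfl hpre
  | x :: xs =>
    by_cases hx : x = 0
    · simp [isSplit, isSplit_alt, hx]
    · simp [isSplit, isSplit_alt, hx, (goB_eq xs 1).1]
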